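-- pv_equiv track=rewrite | github.com/bkane2/eta | _old/update-rule-pronouns.py | preprocess_gist_rules
-- ===== SOURCE A (Python) =====
-- def preprocess_gist_rules(contents):
--   """In the case of gist rules which include topic key, combine gist-clause and topic key"""
--   res = []
--   skip2 = False
--   skip1 = False
--   temp = None
--   for idx, c in enumerate(contents):
--     if skip2:
--       skip2 = False
--       skip1 = True
--       continue
--     if skip1:
--       skip1 = False
--       continue
--
--     if c == '(' and not temp:
--       temp = ['(']
--     elif c == '(' and temp:
--       res += temp
--       res += [c]
--       temp = None
--     elif c == ')' and idx+1 < len(contents) and len(contents[idx+1]) > 1 and temp: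
--       temp += [')']
--       temp += [contents[idx+1]]
--       temp += [contents[idx+2]]
--       res += [''.join(temp)]
--       temp = None
--       skip2 = True
--     elif c == ')' and temp:
--       res += temp
--       res += [c]
--       temp = None
--     elif temp:
--       temp += [c]
--     else:
--       res += [c]
--   return res
-- ===== SOURCE B (Python) =====
-- def preprocess_gist_rules(contents):
--   """In the case of gist rules which include topic key, combine gist-clause and topic key"""
--   res = []
--   i, n = 0, len(contents)
--   while i < n:
--     if contents[i] != '(':
--       res.append(contents[i])
--       i += 1
--       continue
--     # group: scan ahead for the delimiter that closes/flushes the buffer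
--     j = i + 1
--     while j < n and contents[j] != '(' and contents[j] != ')':
--       j += 1
--     if j == n:
--       break  # open group at end of input is dropped
--     if contents[j] == '(':
--       res += contents[i:j] + ['(']
--       i = j + 1
--     elif j + 1 < n and len(contents[j+1]) > 1:
--       res.append(''.join(contents[i:j] + [')', contents[j+1], contents[j+2]]))
--       i = j + 3
--     else:
--       res += contents[i:j] + [')']
--       i = j + 1
--   return res
-- ===== Notes on version B (the rewrite author's own statement) =====
-- stated objective: alternative
-- what changed: Replaced the per-token state machine (skip2/skip1 flags and a temp buffer mutated on every token) by group-directed parsing: an outer loop finds each '(' and an inner span scan locates the delimiter of that group, then a whole slice contents[i:j] is emitted or joined in one step.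
import Mathlib
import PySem

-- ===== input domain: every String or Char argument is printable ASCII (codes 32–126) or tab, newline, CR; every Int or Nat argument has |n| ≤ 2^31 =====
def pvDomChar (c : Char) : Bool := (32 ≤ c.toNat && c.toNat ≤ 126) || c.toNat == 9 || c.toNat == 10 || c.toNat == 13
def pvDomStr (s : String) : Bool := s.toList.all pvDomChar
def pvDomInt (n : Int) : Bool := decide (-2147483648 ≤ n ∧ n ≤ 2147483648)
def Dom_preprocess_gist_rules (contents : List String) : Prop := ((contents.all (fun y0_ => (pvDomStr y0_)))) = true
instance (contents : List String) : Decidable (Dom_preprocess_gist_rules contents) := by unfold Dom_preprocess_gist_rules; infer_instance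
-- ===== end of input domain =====

-- B replaces A's per-token state machine (skip flags + temp buffer) by group-directed parsing:
-- an outer loop over group starts and an inner span scan to each group's delimiter, emitting
-- whole slices; an alternative decomposition of the same cost.

-- ===== PORT A =====
-- Python truthiness of temp (None or a list): falsy iff None or empty.
def pvTempFalsy : Option (List String) → Bool
  | none => true
  | some l => l.isEmpty

-- A's for-loop over enumerate(contents) with flags skip2/skip1 and buffer temp.
-- The unguarded Python access contents[idx+2] is ported with default "" — it is out of range
-- only where Python raises IndexError (A and B raise on exactly the same inputs; the ports
-- still agree there).
def pvGoA (contents : List String) : List (Int × String) → List String → Bool → Bool →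
    Option (List String) → List String
  | [], res, _, _, _ => res
  | (idx, c) :: rest, res, skip2, skip1, temp =>
    if skip2 then pvGoA contents rest res false true temp
    else if skip1 then pvGoA contents rest res false false temp
    else if c = "(" ∧ pvTempFalsy temp then
      pvGoA contents rest res false false (some ["("])
    else if c = "(" ∧ ¬ pvTempFalsy temp then
      pvGoA contents rest (res ++ temp.getD [] ++ [c]) false false none
    else if c = ")" ∧ idx + 1 < (contents.length : Int) ∧
        1 < PySem.Str.len (PySem.List.pyGetD contents (idx + 1) "") ∧ ¬ pvTempFalsy temp then
      pvGoA contents rest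
        (res ++ [PySem.Str.join "" (temp.getD [] ++
          [")", PySem.List.pyGetD contents (idx + 1) "", PySem.List.pyGetD contents (idx + 2) ""])])
        true false none
    else if c = ")" ∧ ¬ pvTempFalsy temp then
      pvGoA contents rest (res ++ temp.getD [] ++ [c]) false false none
    else if ¬ pvTempFalsy temp then
      pvGoA contents rest res false false (some (temp.getD [] ++ [c]))
    else
      pvGoA contents rest (res ++ [c]) false false temp

def preprocess_gist_rules (contents : List String) : List String :=
  pvGoA contents (PySem.List.enumerate contents 0) [] false false none

-- ===== PORT B =====
-- B's inner `while j < n and contents[j] != '(' and contents[j] != ')'` span scan.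
def pvScan (contents : List String) (j : Nat) : Nat :=
  if j < contents.length ∧ contents.getD j "" ≠ "(" ∧ contents.getD j "" ≠ ")" then
    pvScan contents (j + 1)
  else j
termination_by contents.length - j
decreasing_by omega

-- B's outer while loop as fuel recursion (fuel = len(contents) suffices: i strictly grows).
-- The Python slice contents[i:j] (0 ≤ i ≤ j) is ported by hand as (drop i).take (j-i), exact
-- on that range; contents[j+2] likewise ported with default "" — out of range only where
-- Python raises IndexError.
def pvGoB (contents : List String) : Nat → Nat → List String → List String
  | 0, _, res => res
  | gas + 1, i, res =>
    if i < contents.length then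
      if contents.getD i "" ≠ "(" then
        pvGoB contents gas (i + 1) (res ++ [contents.getD i ""])
      else
        let j := pvScan contents (i + 1)
        if j = contents.length then res
        else if contents.getD j "" = "(" then
          pvGoB contents gas (j + 1) (res ++ (contents.drop i).take (j - i) ++ ["("])
        else if j + 1 < contents.length ∧ 1 < PySem.Str.len (contents.getD (j + 1) "") then
          pvGoB contents gas (j + 3)
            (res ++ [PySem.Str.join "" ((contents.drop i).take (j - i) ++
              [")", contents.getD (j + 1) "", contents.getD (j + 2) ""])])
        else
          pvGoB contents gas (j + 1) (res ++ (contents.drop i).take (j - i) ++ [")"])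
    else res

def preprocess_gist_rules_alt (contents : List String) : List String :=
  pvGoB contents contents.length 0 []

-- ===== PRECONDITION & SPEC =====
-- Tracks the single bit of run state (is a gist buffer open?) that decides whether A's
-- unguarded contents[idx+2] is reached: true exactly on inputs where Python A (and B alike)
-- raises IndexError — at an open-buffer ')' whose successor is the last token and longer
-- than one character.  It computes no part of either program's output.
def pvRaisesA : Bool → List String → Bool
  | _, [] => false
  | opn, c :: rest =>
    if opn then
      if c = "(" then pvRaisesA false rest
      else if c = ")" then
        match rest with
        | [] => false
        | nxt :: rest' =>
          if 1 < PySem.Str.len nxt then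
            match rest' with
            | [] => true
            | _ :: rest2 => pvRaisesA false rest2
          else if nxt = "(" then pvRaisesA true rest' else pvRaisesA false rest'
      else pvRaisesA true rest
    else
      if c = "(" then pvRaisesA true rest else pvRaisesA false rest
-- Pre_ excludes exactly the inputs on which Python A raises IndexError (B raises there too).
def Pre_preprocess_gist_rules (contents : List String) : Prop :=
  pvRaisesA false contents = false
instance (contents : List String) : Decidable (Pre_preprocess_gist_rules contents) := by
  unfold Pre_preprocess_gist_rules; infer_instance

def pvWitness_preprocess_gist_rules : List String := ["(", "a", ")", "bb", "x", "y"]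

def Spec_preprocess_gist_rules (contents : List String) (out : List String) : Prop :=
  out = preprocess_gist_rules_alt contents
instance (contents : List String) (out : List String) :
    Decidable (Spec_preprocess_gist_rules contents out) := by
  unfold Spec_preprocess_gist_rules; infer_instance

-- ===== CLAIM (what is proved, stated in full; the proofs are below) =====
def Claim_equal_preprocess_gist_rules : Prop :=
  ∀ (contents : List String), Dom_preprocess_gist_rules contents →
    Pre_preprocess_gist_rules contents →
    Spec_preprocess_gist_rules contents (preprocess_gist_rules contents)

-- ===== LEMMAS AND PROOFS =====

-- One-step unfolding lemmas for pvGoA (variable tail keeps simp from cascading).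
lemma pvGoA_nil (cs : List String) (res : List String) (s2 s1 : Bool)
    (temp : Option (List String)) : pvGoA cs [] res s2 s1 temp = res := rfl

lemma pvGoA_skip2 (cs : List String) (idx : Int) (c : String) (r : List (Int × String))
    (res : List String) (temp : Option (List String)) :
    pvGoA cs ((idx, c) :: r) res true false temp = pvGoA cs r res false true temp := by
  simp [pvGoA]

lemma pvGoA_skip1 (cs : List String) (idx : Int) (c : String) (r : List (Int × String))
    (res : List String) (temp : Option (List String)) :
    pvGoA cs ((idx, c) :: r) res false true temp = pvGoA cs r res false false temp := by
  simp [pvGoA]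

lemma pvGoA_open_none (cs : List String) (idx : Int) (r : List (Int × String))
    (res : List String) :
    pvGoA cs ((idx, "(") :: r) res false false none
      = pvGoA cs r res false false (some ["("]) := by
  simp [pvGoA, pvTempFalsy]

lemma pvGoA_open_some (cs : List String) (idx : Int) (r : List (Int × String))
    (res t : List String) (hne : t ≠ []) :
    pvGoA cs ((idx, "(") :: r) res false false (some t)
      = pvGoA cs r (res ++ t ++ ["("]) false false none := by
  simp [pvGoA, pvTempFalsy, hne]

lemma pvGoA_combine (cs : List String) (idx : Int) (r : List (Int × String))
    (res t : List String) (hne : t ≠ [])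
    (h1 : idx + 1 < (cs.length : Int))
    (h2 : 1 < PySem.Str.len (PySem.List.pyGetD cs (idx + 1) "")) :
    pvGoA cs ((idx, ")") :: r) res false false (some t)
      = pvGoA cs r
          (res ++ [PySem.Str.join "" (t ++
            [")", PySem.List.pyGetD cs (idx + 1) "", PySem.List.pyGetD cs (idx + 2) ""])])
          true false none := by
  have h2' : 1 < (PySem.List.pyGetD cs (idx + 1) "").length := by
    have h := h2; simp [PySem.Str.len_eq] at h; exact_mod_cast h
  simp [pvGoA, pvTempFalsy, hne, h1, h2']

lemma pvGoA_close_some (cs : List String) (idx : Int) (r : List (Int × String))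
    (res t : List String) (hne : t ≠ [])
    (hcond : ¬ (idx + 1 < (cs.length : Int) ∧
      1 < PySem.Str.len (PySem.List.pyGetD cs (idx + 1) ""))) :
    pvGoA cs ((idx, ")") :: r) res false false (some t)
      = pvGoA cs r (res ++ t ++ [")"]) false false none := by
  rcases Decidable.not_and_iff_not_or_not.mp hcond with h | h
  · simp [pvGoA, pvTempFalsy, hne, h]
  · have h' : ¬ 1 < (PySem.List.pyGetD cs (idx + 1) "").length := by
      intro hgt; exact h (by simp [PySem.Str.len_eq]; exact_mod_cast hgt)
    simp [pvGoA, pvTempFalsy, hne, h']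

lemma pvGoA_buffer (cs : List String) (idx : Int) (c : String) (r : List (Int × String))
    (res t : List String) (hne : t ≠ []) (h1 : c ≠ "(") (h2 : c ≠ ")") :
    pvGoA cs ((idx, c) :: r) res false false (some t)
      = pvGoA cs r res false false (some (t ++ [c])) := by
  simp [pvGoA, pvTempFalsy, hne, h1, h2]

lemma pvGoA_emit (cs : List String) (idx : Int) (c : String) (r : List (Int × String))
    (res : List String) (h1 : c ≠ "(") :
    pvGoA cs ((idx, c) :: r) res false false none
      = pvGoA cs r (res ++ [c]) false false none := by
  by_cases h2 : c = ")" <;> simp [pvGoA, pvTempFalsy, h1, h2]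

-- pvScan unfolding and bounds.
lemma pvScan_step (cs : List String) (j : Nat)
    (h : j < cs.length ∧ cs.getD j "" ≠ "(" ∧ cs.getD j "" ≠ ")") :
    pvScan cs j = pvScan cs (j + 1) := by rw [pvScan, if_pos h]

lemma pvScan_stop (cs : List String) (j : Nat)
    (h : ¬ (j < cs.length ∧ cs.getD j "" ≠ "(" ∧ cs.getD j "" ≠ ")")) :
    pvScan cs j = j := by rw [pvScan, if_neg h]

lemma pvScan_ge (cs : List String) (j : Nat) : j ≤ pvScan cs j := by
  fun_induction pvScan cs j with
  | case1 j h ih => omega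
  | case2 j h => omega

lemma pvScan_le (cs : List String) (j : Nat) (h : j ≤ cs.length) :
    pvScan cs j ≤ cs.length := by
  fun_induction pvScan cs j with
  | case1 j hc ih => exact ih (by omega)
  | case2 j hc => exact h

-- After the combine case, A's skip2/skip1 flags consume the next two tokens: the scan resumes at j+2.
lemma pvGoA_skip (contents : List String) (j : Nat) (res : List String) :
    pvGoA contents (PySem.List.enumerate (contents.drop j) (j : Int)) res true false none
      = pvGoA contents (PySem.List.enumerate (contents.drop (j + 2)) ((j + 2 : Nat) : Int)) res
          false false none := by
  by_cases hj : j < contents.length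
  · rw [List.drop_eq_getElem_cons hj, PySem.List.enumerate_cons, pvGoA_skip2]
    by_cases hj1 : j + 1 < contents.length
    · rw [List.drop_eq_getElem_cons hj1, PySem.List.enumerate_cons, pvGoA_skip1]
      have hc : ((j : Int) + 1) + 1 = ((j + 2 : Nat) : Int) := by push_cast; ring
      rw [hc]
    · have h1 : contents.drop (j + 1) = [] := by rw [List.drop_eq_nil_iff]; omega
      have h2 : contents.drop (j + 2) = [] := by rw [List.drop_eq_nil_iff]; omega
      rw [h1, h2, PySem.List.enumerate_nil, PySem.List.enumerate_nil, pvGoA_nil, pvGoA_nil]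
  · have h1 : contents.drop j = [] := by rw [List.drop_eq_nil_iff]; omega
    have h2 : contents.drop (j + 2) = [] := by rw [List.drop_eq_nil_iff]; omega
    rw [h1, h2, PySem.List.enumerate_nil, PySem.List.enumerate_nil, pvGoA_nil, pvGoA_nil]

-- What A does from an open-buffer state, expressed at the delimiter found by pvScan.
def pvAfter (cs : List String) (res buf : List String) (j' : Nat) : List String :=
  if j' < cs.length then
    if cs.getD j' "" = "(" then
      pvGoA cs (PySem.List.enumerate (cs.drop (j' + 1)) ((j' + 1 : Nat) : Int))
        (res ++ buf ++ ["("]) false false none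
    else if j' + 1 < cs.length ∧ 1 < PySem.Str.len (cs.getD (j' + 1) "") then
      pvGoA cs (PySem.List.enumerate (cs.drop (j' + 3)) ((j' + 3 : Nat) : Int))
        (res ++ [PySem.Str.join "" (buf ++
          [")", cs.getD (j' + 1) "", cs.getD (j' + 2) ""])]) false false none
    else
      pvGoA cs (PySem.List.enumerate (cs.drop (j' + 1)) ((j' + 1 : Nat) : Int))
        (res ++ buf ++ [")"]) false false none
  else res

-- Buffered phase: A's run with an open buffer equals pvAfter at the pvScan delimiter.
lemma pvBuf (m : Nat) : ∀ (cs : List String) (j : Nat) (res t : List String),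
    cs.length - j ≤ m → t ≠ [] →
    pvGoA cs (PySem.List.enumerate (cs.drop j) (j : Int)) res false false (some t)
      = pvAfter cs res (t ++ (cs.drop j).take (pvScan cs j - j)) (pvScan cs j) := by
  induction m with
  | zero =>
    intro cs j res t hm _
    have hge : cs.length ≤ j := by omega
    have h1 : cs.drop j = [] := by rw [List.drop_eq_nil_iff]; omega
    have hs : pvScan cs j = j := pvScan_stop _ _ (by omega)
    rw [h1, PySem.List.enumerate_nil, pvGoA_nil, hs, pvAfter, if_neg (by omega)]
  | succ m ih =>
    intro cs j res t hm hne
    by_cases hj : j < cs.length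
    · have hgd : cs.getD j "" = cs[j] := List.getD_eq_getElem _ _ hj
      rw [List.drop_eq_getElem_cons hj, PySem.List.enumerate_cons]
      have hc1 : (j : Int) + 1 = ((j + 1 : Nat) : Int) := by push_cast; ring
      have hpg1 : PySem.List.pyGetD cs ((j : Int) + 1) "" = cs.getD (j + 1) "" := by
        rw [hc1, PySem.List.pyGetD_natCast]
      have hpg2 : PySem.List.pyGetD cs ((j : Int) + 2) "" = cs.getD (j + 2) "" := by
        have hc2 : (j : Int) + 2 = ((j + 2 : Nat) : Int) := by push_cast; ring
        rw [hc2, PySem.List.pyGetD_natCast]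
      by_cases hp : cs[j] = "("
      · have hs : pvScan cs j = j := pvScan_stop _ _ (by rw [hgd, hp]; simp)
        rw [hp, pvGoA_open_some _ _ _ _ _ hne, hs, pvAfter, if_pos hj, if_pos (by rw [hgd, hp])]
        simp only [hc1, Nat.sub_self, List.take_zero, List.append_nil]
      · by_cases hq : cs[j] = ")"
        · have hs : pvScan cs j = j := pvScan_stop _ _ (by rw [hgd, hq]; simp)
          by_cases hcond : j + 1 < cs.length ∧ 1 < PySem.Str.len (cs.getD (j + 1) "")
          · rw [hq, pvGoA_combine _ _ _ _ _ hne (by exact_mod_cast hcond.1)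
              (by rw [hpg1]; exact hcond.2), hpg1, hpg2, hc1, pvGoA_skip]
            rw [hs, pvAfter, if_pos hj, if_neg (by rw [hgd, hq]; simp), if_pos hcond]
            have h3 : j + 1 + 2 = j + 3 := rfl
            simp only [h3, Nat.sub_self, List.take_zero, List.append_nil]
          · rw [hq, pvGoA_close_some _ _ _ _ _ hne
              (by rw [hpg1]; intro hco; exact hcond ⟨by exact_mod_cast hco.1, hco.2⟩)]
            rw [hs, pvAfter, if_pos hj, if_neg (by rw [hgd, hq]; simp), if_neg hcond]
            simp only [hc1, Nat.sub_self, List.take_zero, List.append_nil]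
        · have hs : pvScan cs j = pvScan cs (j + 1) :=
            pvScan_step _ _ ⟨hj, by rw [hgd]; exact hp, by rw [hgd]; exact hq⟩
          rw [pvGoA_buffer _ _ _ _ _ _ hne hp hq, hc1]
          rw [ih cs (j + 1) res (t ++ [cs[j]]) (by omega) (by simp)]
          rw [hs]
          have hge : j + 1 ≤ pvScan cs (j + 1) := pvScan_ge _ _
          have htk : t ++ (cs[j] :: cs.drop (j + 1)).take (pvScan cs (j + 1) - j)
              = (t ++ [cs[j]]) ++ (cs.drop (j + 1)).take (pvScan cs (j + 1) - (j + 1)) := by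
            have : pvScan cs (j + 1) - j = (pvScan cs (j + 1) - (j + 1)) + 1 := by omega
            rw [this, List.take_succ_cons]
            simp
          rw [htk]
    · have h1 : cs.drop j = [] := by rw [List.drop_eq_nil_iff]; omega
      have hs : pvScan cs j = j := pvScan_stop _ _ (by omega)
      rw [h1, PySem.List.enumerate_nil, pvGoA_nil, hs, pvAfter, if_neg (by omega)]

-- One-step unfolding for pvGoB.
lemma pvGoB_zero (cs : List String) (i : Nat) (res : List String) :
    pvGoB cs 0 i res = res := rfl

lemma pvGoB_stop (cs : List String) (gas i : Nat) (res : List String)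
    (h : ¬ i < cs.length) : pvGoB cs (gas + 1) i res = res := by
  rw [pvGoB, if_neg h]

lemma pvGoB_emit (cs : List String) (gas i : Nat) (res : List String)
    (h : i < cs.length) (hc : cs.getD i "" ≠ "(") :
    pvGoB cs (gas + 1) i res = pvGoB cs gas (i + 1) (res ++ [cs.getD i ""]) := by
  rw [pvGoB, if_pos h, if_pos hc]

lemma pvGoB_group (cs : List String) (gas i : Nat) (res : List String)
    (h : i < cs.length) (hc : cs.getD i "" = "(") :
    pvGoB cs (gas + 1) i res
      = (let j := pvScan cs (i + 1)
         if j = cs.length then res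
         else if cs.getD j "" = "(" then
           pvGoB cs gas (j + 1) (res ++ (cs.drop i).take (j - i) ++ ["("])
         else if j + 1 < cs.length ∧ 1 < PySem.Str.len (cs.getD (j + 1) "") then
           pvGoB cs gas (j + 3)
             (res ++ [PySem.Str.join "" ((cs.drop i).take (j - i) ++
               [")", cs.getD (j + 1) "", cs.getD (j + 2) ""])])
         else pvGoB cs gas (j + 1) (res ++ (cs.drop i).take (j - i) ++ [")"])) := by
  rw [pvGoB, if_pos h, if_neg (fun hne => hne hc)]

-- Main invariant: A's flag machine on the enumerated suffix equals B's group loop.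
lemma pvGo_eq (k : Nat) : ∀ (cs : List String) (i : Nat) (res : List String),
    cs.length - i ≤ k →
    pvGoA cs (PySem.List.enumerate (cs.drop i) (i : Int)) res false false none
      = pvGoB cs k i res := by
  induction k with
  | zero =>
    intro cs i res hk
    have h1 : cs.drop i = [] := by rw [List.drop_eq_nil_iff]; omega
    rw [h1, PySem.List.enumerate_nil, pvGoA_nil, pvGoB_zero]
  | succ k ih =>
    intro cs i res hk
    by_cases hi : i < cs.length
    · have hgd : cs.getD i "" = cs[i] := List.getD_eq_getElem _ _ hi
      by_cases hp : cs[i] = "("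
      · rw [List.drop_eq_getElem_cons hi, PySem.List.enumerate_cons, hp, pvGoA_open_none]
        have hc1 : (i : Int) + 1 = ((i + 1 : Nat) : Int) := by push_cast; ring
        rw [hc1, pvBuf cs.length cs (i + 1) res ["("] (by omega) (by simp)]
        rw [pvGoB_group _ _ _ _ hi (by rw [hgd, hp])]
        set j := pvScan cs (i + 1) with hjdef
        have hge : i + 1 ≤ j := pvScan_ge _ _
        have hle : j ≤ cs.length := pvScan_le _ _ (by omega)
        have hbuf : ["("] ++ (cs.drop (i + 1)).take (j - (i + 1))
            = (cs.drop i).take (j - i) := by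
          rw [List.drop_eq_getElem_cons hi, hp]
          have : j - i = (j - (i + 1)) + 1 := by omega
          rw [this, List.take_succ_cons, List.singleton_append]
        rw [hbuf, pvAfter]
        by_cases hjn : j = cs.length
        · rw [if_neg (by omega)]; simp [hjn]
        · have hjlt : j < cs.length := by omega
          rw [if_pos hjlt]
          simp only [if_neg hjn]
          by_cases hq : cs.getD j "" = "("
          · rw [if_pos hq, if_pos hq, ih cs (j + 1) _ (by omega)]
          · rw [if_neg hq, if_neg hq]
            by_cases hcond : j + 1 < cs.length ∧ 1 < PySem.Str.len (cs.getD (j + 1) "")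
            · rw [if_pos hcond, if_pos hcond, ih cs (j + 3) _ (by omega)]
            · rw [if_neg hcond, if_neg hcond, ih cs (j + 1) _ (by omega)]
      · rw [List.drop_eq_getElem_cons hi, PySem.List.enumerate_cons,
          pvGoA_emit _ _ _ _ _ hp, pvGoB_emit _ _ _ _ hi (by rw [hgd]; exact hp)]
        have hc1 : (i : Int) + 1 = ((i + 1 : Nat) : Int) := by push_cast; ring
        rw [hc1, hgd, ih cs (i + 1) _ (by omega)]
    · have h1 : cs.drop i = [] := by rw [List.drop_eq_nil_iff]; omega
      rw [h1, PySem.List.enumerate_nil, pvGoA_nil, pvGoB_stop _ _ _ _ hi]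

-- ===== VERDICT (by name: the statement is the Claim_ definition above) =====
theorem preprocess_gist_rules_spec : Claim_equal_preprocess_gist_rules := by
  intro contents _ _
  unfold Spec_preprocess_gist_rules preprocess_gist_rules preprocess_gist_rules_alt
  have h := pvGo_eq contents.length contents 0 [] (by omega)
  simpa using h
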